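-- pv_equiv track=rewrite | github.com/Liri3d/PortraitSemObj | script.py | build_dict_char
-- ===== SOURCE A (Python) =====
-- def build_dict_char(scripts):
--
--     # Получаем уникальные элементы всех скриптов для упрощения
--     unique_elements = set()
--     for script in scripts:
--         unique_elements.update(script)
--
--     # Словарь для хранения множеств следования
--     sequences = {elem: [] for elem in unique_elements}
--
--     # Смотрим на все комбинации в скриптах
--     for i in range(len(scripts)):
--         for j in range(len(scripts[i]) - 1):
--             primary = scripts[i][j]
--             secondary = scripts[i][j + 1]
--             sequences[primary].append(secondary)
--
--     return sequences
-- ===== SOURCE B (Python) =====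
-- def build_dict_char(scripts):
--     # Gather-style (group-by-filter) algorithm: instead of scattering appends
--     # into many lists in one pass, flatten ALL adjacent pairs once, list the
--     # distinct elements in first-occurrence order, and build each key's
--     # successor list by filtering the flat pair list for that key.
--     pairs = [(a, b) for s in scripts for (a, b) in zip(s, s[1:])]
--     keys = dict.fromkeys(ch for s in scripts for ch in s)
--     return {e: [b for (a, b) in pairs if a == e] for e in keys}
-- ===== Notes on version B (the rewrite author's own statement) =====
-- stated objective: alternative
-- what changed: A scatters: it pre-builds a dict of empty lists and walks every script with nested index loops appending each successor to its key's list; B gathers: it flattens all adjacent pairs into one list, lists the distinct elements in first-occurrence order, and constructs each key's successor list by filtering the flat pair list per key (group-by-filter, trading A's single scatter pass for per-key scans).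
import Mathlib
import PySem

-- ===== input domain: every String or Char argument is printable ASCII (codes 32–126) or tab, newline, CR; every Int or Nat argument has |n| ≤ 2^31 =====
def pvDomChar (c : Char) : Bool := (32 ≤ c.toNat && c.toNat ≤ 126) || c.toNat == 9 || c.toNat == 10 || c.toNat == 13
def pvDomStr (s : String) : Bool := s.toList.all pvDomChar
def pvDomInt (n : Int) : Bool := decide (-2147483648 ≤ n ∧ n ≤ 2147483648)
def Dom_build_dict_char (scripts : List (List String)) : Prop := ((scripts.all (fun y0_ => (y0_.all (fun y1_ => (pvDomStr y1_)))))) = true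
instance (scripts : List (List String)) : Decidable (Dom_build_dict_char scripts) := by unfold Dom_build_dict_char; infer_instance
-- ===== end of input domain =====

-- B replaces A's scatter (one pass appending each successor into its key's list) with a
-- gather: flatten all adjacent pairs once, then build each key's list by filtering per key.
-- Objective: alternative algorithm; key order of the items list follows first occurrence
-- (Python set/dict iteration order is not part of dict equality).
-- ===== PORT A =====
def build_dict_char (scripts : List (List String)) : List (String × List String) :=
  -- unique_elements = set(); for script in scripts: unique_elements.update(script)
  let unique : PySem.Set String :=
    scripts.foldl (fun s script => PySem.Set.update s script) PySem.Set.empty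
  -- sequences = {elem: [] for elem in unique_elements}
  let sequences : PySem.Dict String (List String) :=
    unique.foldl (fun d elem => d.insert elem ([] : List String)) PySem.Dict.empty
  -- for i in range(len(scripts)): for j in range(len(scripts[i]) - 1): ...
  let sequences :=
    (PySem.List.pyRange 0 (scripts.length : Int) 1).foldl (fun d i =>
      let script := PySem.List.pyGetD scripts i []
      (PySem.List.pyRange 0 ((script.length : Int) - 1) 1).foldl (fun d j =>
        let primary := PySem.List.pyGetD script j ""
        let secondary := PySem.List.pyGetD script (j + 1) ""
        -- sequences[primary].append(secondary): primary is always a present key, so modify is exact here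
        d.modify primary [] (fun l => l ++ [secondary])) d) sequences
  sequences.items

-- ===== PORT B =====
def build_dict_char_alt (scripts : List (List String)) : List (String × List String) :=
  -- pairs = [(a, b) for s in scripts for (a, b) in zip(s, s[1:])]  (s[1:] = drop 1, exact)
  let pairs : List (String × String) := scripts.flatMap (fun s => s.zip (s.drop 1))
  -- keys = dict.fromkeys(ch for s in scripts for ch in s)  (ordered dedup = PySem.List.dedup)
  let keys : List String := PySem.List.dedup (scripts.flatMap (fun s => s))
  -- {e: [b for (a, b) in pairs if a == e] for e in keys}
  (keys.foldl (fun d e =>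
      d.insert e ((pairs.filter (fun q => q.1 == e)).map (fun q => q.2)))
    PySem.Dict.empty).items

-- ===== PRECONDITION & SPEC =====
def Spec_build_dict_char (scripts : List (List String)) (out : List (String × List String)) : Prop := out = build_dict_char_alt scripts
instance (scripts : List (List String)) (out : List (String × List String)) : Decidable (Spec_build_dict_char scripts out) := by unfold Spec_build_dict_char; infer_instance

-- ===== CLAIM (what is proved, stated in full; the proofs are below) =====
def Claim_equal_build_dict_char : Prop := ∀ (scripts : List (List String)), Dom_build_dict_char scripts → Spec_build_dict_char scripts (build_dict_char scripts)

-- ===== LEMMAS AND PROOFS =====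

-- Proof-layer names for the shared shapes of the two ports.
def pvPairs (s : List String) : List (String × String) := s.zip s.tail

def pvStep (d : PySem.Dict String (List String)) (p : String × String) : PySem.Dict String (List String) :=
  d.modify p.1 [] (fun l => l ++ [p.2])

def pvKeysOf (scripts : List (List String)) : PySem.Set String :=
  scripts.foldl (fun s script => PySem.Set.update s script) PySem.Set.empty

def pvSucc (scripts : List (List String)) (k : String) : List String :=
  ((scripts.flatMap pvPairs).filter (fun q => q.1 == k)).map (fun q => q.2)

-- shift a unit-step range fold by one
theorem pv_shift {β : Type} (f : β → Int → β) (a b : Int) (init : β) :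
    (PySem.List.pyRange (a+1) (b+1)).foldl f init
      = (PySem.List.pyRange a b).foldl (fun acc j => f acc (j+1)) init := by
  rw [PySem.List.pyRange_one, PySem.List.pyRange_one]
  have h : b + 1 - (a + 1) = b - a := by ring
  rw [h, List.foldl_map, List.foldl_map]
  apply PySem.List.foldl_congr_mem
  intro acc k _
  have : a + 1 + (k : Int) = a + k + 1 := by ring
  rw [this]

theorem pv_getD_cons (a : String) (s : List String) (j : Int) (hj : 0 ≤ j) (d : String) :
    PySem.List.pyGetD (a :: s) (j + 1) d = PySem.List.pyGetD s j d := by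
  obtain ⟨n, rfl⟩ := Int.eq_ofNat_of_zero_le hj
  have h1 : ((n : Int) + 1) = ((n + 1 : Nat) : Int) := by push_cast; ring
  rw [h1, PySem.List.pyGetD_natCast, PySem.List.pyGetD_natCast]
  rfl

-- A's inner index loop over j, j+1 is the fold over adjacent pairs
theorem pv_innerA {δ : Type} (g : δ → String → String → δ) :
    ∀ (s : List String) (init : δ),
      (PySem.List.pyRange 0 ((s.length : Int) - 1)).foldl
          (fun d j => g d (PySem.List.pyGetD s j "") (PySem.List.pyGetD s (j+1) "")) init
        = (s.zip s.tail).foldl (fun d p => g d p.1 p.2) init := by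
  intro s
  induction s with
  | nil => intro init; simp
  | cons a s ih =>
    cases s with
    | nil => intro init; simp
    | cons b t =>
      intro init
      have hlen : ((a :: b :: t).length : Int) - 1 = (t.length : Int) + 1 := by
        simp only [List.length_cons]; push_cast; ring
      rw [hlen, PySem.List.pyRange_one_cons (by omega)]
      simp only [List.foldl_cons]
      have h0 : PySem.List.pyGetD (a :: b :: t) 0 "" = a := by
        rw [show (0 : Int) = ((0 : Nat) : Int) from rfl, PySem.List.pyGetD_natCast]
        rfl
      have h1 : PySem.List.pyGetD (a :: b :: t) (0 + 1) "" = b := by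
        rw [show ((0 : Int) + 1) = ((1 : Nat) : Int) from rfl, PySem.List.pyGetD_natCast]
        rfl
      rw [h0, h1, show ((0 : Int) + 1) = 1 by norm_num]
      have hsh := pv_shift (fun d j => g d (PySem.List.pyGetD (a :: b :: t) j "")
        (PySem.List.pyGetD (a :: b :: t) (j+1) "")) 0 (t.length : Int) (g init a b)
      rw [show ((0 : Int) + 1) = 1 by norm_num] at hsh
      rw [hsh]
      have hcg : (PySem.List.pyRange 0 (t.length : Int)).foldl
          (fun acc j => g acc (PySem.List.pyGetD (a :: b :: t) (j+1) "")
            (PySem.List.pyGetD (a :: b :: t) (j+1+1) "")) (g init a b)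
          = (PySem.List.pyRange 0 (t.length : Int)).foldl
          (fun acc j => g acc (PySem.List.pyGetD (b :: t) j "")
            (PySem.List.pyGetD (b :: t) (j+1) "")) (g init a b) := by
        apply PySem.List.foldl_congr_mem
        intro acc j hj
        have hj0 : 0 ≤ j := ((PySem.List.mem_pyRange_one).1 hj).1
        rw [pv_getD_cons a (b :: t) j hj0, pv_getD_cons a (b :: t) (j+1) (by omega)]
      rw [hcg]
      have hlen2 : ((b :: t).length : Int) - 1 = (t.length : Int) := by
        simp
      have := ih (g init a b)
      rw [hlen2] at this
      rw [this]
      simp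

-- A's whole computation as one flat fold over all adjacent pairs
theorem pv_A_eq (scripts : List (List String)) :
    build_dict_char scripts
      = ((scripts.flatMap pvPairs).foldl pvStep
          ((pvKeysOf scripts).foldl (fun d e => d.insert e ([] : List String)) PySem.Dict.empty)).items := by
  show ((PySem.List.pyRange 0 (scripts.length : Int)).foldl (fun d i =>
      (PySem.List.pyRange 0 (((PySem.List.pyGetD scripts i []).length : Int) - 1)).foldl (fun d j =>
        d.modify (PySem.List.pyGetD (PySem.List.pyGetD scripts i []) j "") []
          (fun l => l ++ [PySem.List.pyGetD (PySem.List.pyGetD scripts i []) (j+1) ""]))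
        d)
      ((pvKeysOf scripts).foldl (fun d e => d.insert e ([] : List String)) PySem.Dict.empty)).items = _
  congr 1
  have hout := PySem.List.foldl_pyRange_pyGetD' scripts []
    (fun d script => (PySem.List.pyRange 0 ((script.length : Int) - 1)).foldl (fun d j =>
      d.modify (PySem.List.pyGetD script j "") [] (fun l => l ++ [PySem.List.pyGetD script (j+1) ""])) d)
    ((pvKeysOf scripts).foldl (fun d e => d.insert e ([] : List String)) PySem.Dict.empty) (le_refl 0)
  rw [Int.toNat_zero, List.drop_zero] at hout
  rw [hout]
  rw [List.foldl_flatMap]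
  apply PySem.List.foldl_congr_mem
  intro acc s _
  exact pv_innerA (fun d x y => d.modify x [] (fun l => l ++ [y])) s acc

theorem pv_mem_K (scripts : List (List String)) :
    ∀ (s0 : PySem.Set String) (x : String),
      x ∈ scripts.foldl (fun s sc => PySem.Set.update s sc) s0 ↔ x ∈ s0 ∨ ∃ sc ∈ scripts, x ∈ sc := by
  induction scripts with
  | nil => intro s0 x; simp
  | cons sc rest ih =>
    intro s0 x
    rw [List.foldl_cons, ih, PySem.Set.mem_update]
    simp only [List.mem_cons]
    constructor
    · rintro (⟨h | h⟩ | ⟨s, hs, hx⟩)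
      · exact Or.inl h
      · exact Or.inr ⟨sc, Or.inl rfl, h⟩
      · exact Or.inr ⟨s, Or.inr hs, hx⟩
    · rintro (h | ⟨s, (rfl | hs), hx⟩)
      · exact Or.inl (Or.inl h)
      · exact Or.inl (Or.inr hx)
      · exact Or.inr ⟨s, hs, hx⟩

theorem pv_nodup_K (scripts : List (List String)) :
    ∀ (s0 : PySem.Set String), s0.Nodup →
      (scripts.foldl (fun s sc => PySem.Set.update s sc) s0).Nodup := by
  induction scripts with
  | nil => intro s0 h; exact h
  | cons sc rest ih => intro s0 h; exact ih _ (PySem.Set.nodup_update _ _ h)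

theorem pv_update_of_subset (l : List String) :
    ∀ (s : PySem.Set String), (∀ x ∈ l, x ∈ s) → PySem.Set.update s l = s := by
  induction l with
  | nil => intro s _; rfl
  | cons a t ih =>
    intro s h
    rw [PySem.Set.update_cons, PySem.Set.add_of_mem (h a (List.mem_cons_self ..))]
    exact ih s (fun x hx => h x (List.mem_cons_of_mem _ hx))

theorem pv_getD_insertfold (l : List String) :
    ∀ (d : PySem.Dict String (List String)), (∀ k, d.getD k [] = []) →
      ∀ k, (l.foldl (fun d e => d.insert e ([] : List String)) d).getD k ([] : List String) = [] := by
  induction l with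
  | nil => intro d h k; exact h k
  | cons e t ih =>
    intro d h k
    rw [List.foldl_cons]
    refine ih _ (fun k' => ?_) k
    rw [PySem.Dict.getD_insert]
    split
    · rfl
    · exact h k'

-- the unique-element fold is the ordered dedup of the concatenation
theorem pv_K_eq_dedup (scripts : List (List String)) :
    pvKeysOf scripts = PySem.List.dedup (scripts.flatMap (fun s => s)) := by
  have gen : ∀ (l : List (List String)) (s0 : PySem.Set String),
      l.foldl (fun s sc => PySem.Set.update s sc) s0 = PySem.Set.update s0 (l.flatMap (fun s => s)) := by
    intro l
    induction l with
    | nil => intro s0; rfl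
    | cons sc rest ih =>
      intro s0
      rw [List.foldl_cons, ih, List.flatMap_cons, PySem.Set.update_append]
  rw [pvKeysOf, gen, PySem.List.dedup_eq_ofList, ← PySem.Set.update_empty]

-- both ports compute the same canonical association list
theorem pv_A_items (scripts : List (List String)) :
    build_dict_char scripts = (pvKeysOf scripts).map (fun k => (k, pvSucc scripts k)) := by
  rw [pv_A_eq]
  have hK : (pvKeysOf scripts).Nodup := pv_nodup_K scripts _ List.nodup_nil
  have hkeys0 : ((pvKeysOf scripts).foldl (fun d e => d.insert e ([] : List String)) PySem.Dict.empty).keys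
      = pvKeysOf scripts := by
    calc ((pvKeysOf scripts).foldl (fun d e => d.insert e ([] : List String)) PySem.Dict.empty).keys
        = PySem.Set.update (PySem.Dict.empty : PySem.Dict String (List String)).keys (pvKeysOf scripts) :=
          PySem.Dict.keys_foldl_insert (pvKeysOf scripts) (fun _ _ => []) PySem.Dict.empty
      _ = pvKeysOf scripts := by
          rw [PySem.Dict.keys_empty, PySem.Set.update_eq_append_of_disjoint _ _ hK (by simp)]
          simp
  have hgetd0 : ∀ k, ((pvKeysOf scripts).foldl (fun d e => d.insert e ([] : List String)) PySem.Dict.empty).getD k [] = [] :=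
    pv_getD_insertfold _ _ (fun k => by rw [PySem.Dict.getD_empty])
  have hkeysA : ((scripts.flatMap pvPairs).foldl pvStep
      ((pvKeysOf scripts).foldl (fun d e => d.insert e ([] : List String)) PySem.Dict.empty)).keys
      = pvKeysOf scripts := by
    calc ((scripts.flatMap pvPairs).foldl pvStep
        ((pvKeysOf scripts).foldl (fun d e => d.insert e ([] : List String)) PySem.Dict.empty)).keys
        = PySem.Set.update _ ((scripts.flatMap pvPairs).map Prod.fst) :=
          PySem.Dict.keys_foldl_modify_key (scripts.flatMap pvPairs) Prod.fst []
            (fun _ p => fun l => l ++ [p.2]) _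
      _ = pvKeysOf scripts := by
          rw [hkeys0]
          apply pv_update_of_subset
          intro x hx
          obtain ⟨q, hq, rfl⟩ := List.mem_map.1 hx
          obtain ⟨sc, hsc, hqp⟩ := List.mem_flatMap.1 hq
          have : q.1 ∈ sc := by
            have := List.of_mem_zip (show (q.1, q.2) ∈ sc.zip sc.tail from by
              simpa using hqp)
            exact this.1
          exact (pv_mem_K scripts PySem.Set.empty q.1).2 (Or.inr ⟨sc, hsc, this⟩)
  have hgetA : ∀ k, ((scripts.flatMap pvPairs).foldl pvStep
      ((pvKeysOf scripts).foldl (fun d e => d.insert e ([] : List String)) PySem.Dict.empty)).getD k []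
      = pvSucc scripts k := by
    intro k
    calc ((scripts.flatMap pvPairs).foldl pvStep
        ((pvKeysOf scripts).foldl (fun d e => d.insert e ([] : List String)) PySem.Dict.empty)).getD k []
        = _ ++ ((scripts.flatMap pvPairs).filter (fun q => q.1 == k)).map (fun q => q.2) :=
          PySem.Dict.getD_foldl_modify_append (scripts.flatMap pvPairs) _ k
      _ = pvSucc scripts k := by rw [hgetd0 k]; simp [pvSucc]
  rw [PySem.Dict.items_eq_map_keys _ (by rw [hkeysA]; exact hK) ([] : List String), hkeysA]
  exact List.map_congr_left (fun k _ => by rw [hgetA k])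

theorem pv_B_items (scripts : List (List String)) :
    build_dict_char_alt scripts = (pvKeysOf scripts).map (fun k => (k, pvSucc scripts k)) := by
  unfold build_dict_char_alt
  have hK : (pvKeysOf scripts).Nodup := pv_nodup_K scripts _ List.nodup_nil
  rw [← pv_K_eq_dedup]
  have hfresh := PySem.Dict.items_foldl_insert_fresh (pvKeysOf scripts) (fun e => e)
    (fun e => (((scripts.flatMap (fun s => s.zip (s.drop 1))).filter (fun q => q.1 == e)).map (fun q => q.2)))
    PySem.Dict.empty
    (fun a _ => PySem.Dict.contains_empty a)
    (by simp only [List.map_id']; exact hK)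
  simp only at hfresh
  have hemp : (PySem.Dict.empty : PySem.Dict String (List String)).items = [] := rfl
  rw [hfresh, hemp, List.nil_append]
  apply List.map_congr_left
  intro k _
  have hz : (fun s : List String => s.zip (s.drop 1)) = pvPairs := by
    funext s; rw [pvPairs, List.drop_one]
  rw [hz]
  rfl

-- ===== VERDICT (by name: the statement is the Claim_ definition above) =====
theorem build_dict_char_spec : Claim_equal_build_dict_char := by
  intro scripts _
  unfold Spec_build_dict_char
  rw [pv_A_items, pv_B_items]
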